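-- pv_equiv track=rewrite | github.com/BrzonDom/ACM | Skiena Challenges/03.Strings/03.Common Permutation.py | findCommonChar
-- ===== SOURCE A (Python) =====
-- def findCommonChar(dataWord):
--
--     commonChar = []
--
--     if len(dataWord[0]) <= len(dataWord[1]):
--
--         for char in dataWord[0]:
--             if char in dataWord[1]:
--                 commonChar += min(dataWord[0][char], dataWord[1][char]) * [char]
--                 # commonStr += min(dataWord[0][char], dataWord[1][char]) * char
--
--     else:
--         for char in dataWord[1]:
--             if char in dataWord[0]:
--                 commonChar += min(dataWord[0][char], dataWord[1][char]) * [char]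
--                 # commonStr += min(dataWord[0][char], dataWord[1][char]) * char
--
--     commonChar.sort()
--     return commonChar
-- ===== SOURCE B (Python) =====
-- def findCommonChar(dataWord):
--     # Sort both dicts' items by key, then sweep the two sorted item lists in
--     # step (a sort-merge join), emitting min(n0, n1) copies of each shared key;
--     # the result comes out already sorted, so no final sort is needed.
--     items0 = sorted(dataWord[0].items(), key=lambda kv: kv[0])
--     items1 = sorted(dataWord[1].items(), key=lambda kv: kv[0])
--     res = []
--     i = j = 0
--     while i < len(items0) and j < len(items1):
--         c0, n0 = items0[i]
--         c1, n1 = items1[j]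
--         if c0 < c1:
--             i += 1
--         elif c1 < c0:
--             j += 1
--         else:
--             res += min(n0, n1) * [c0]
--             i += 1
--             j += 1
--     return res
-- ===== Notes on version B (the rewrite author's own statement) =====
-- stated objective: alternative
-- what changed: Replaces A's iterate-the-shorter-dict loop with per-key membership tests and a final sort by a sort-merge join: both dicts' items are sorted by key once and swept in step with two pointers, emitting min(n0, n1) copies of each shared key already in order.
import Mathlib
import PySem

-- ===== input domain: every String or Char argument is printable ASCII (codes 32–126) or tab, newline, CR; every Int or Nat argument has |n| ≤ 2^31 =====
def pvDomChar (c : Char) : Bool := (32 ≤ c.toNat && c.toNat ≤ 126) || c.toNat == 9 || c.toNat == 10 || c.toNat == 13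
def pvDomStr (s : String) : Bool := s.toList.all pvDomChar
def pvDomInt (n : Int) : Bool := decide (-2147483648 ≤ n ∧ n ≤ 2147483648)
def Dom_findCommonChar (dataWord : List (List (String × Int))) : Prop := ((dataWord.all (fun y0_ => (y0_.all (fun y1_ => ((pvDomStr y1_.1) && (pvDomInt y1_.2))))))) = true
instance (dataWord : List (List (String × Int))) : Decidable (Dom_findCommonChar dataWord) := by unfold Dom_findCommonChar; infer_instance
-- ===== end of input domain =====

-- B replaces the key-iteration + per-key min loop by expanding both count-dicts into
-- sorted character lists and intersecting them with a two-pointer merge (objective: alternative).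

-- ===== PORT A =====
-- A iterates the keys of the shorter dict, appends min(d0[c], d1[c]) copies of each
-- common key (a negative min contributes nothing, as n * [c] does), then sorts.
def findCommonChar (dataWord : List (List (String × Int))) : List String :=
  let d0 := (PySem.List.pyGet? dataWord 0).getD []
  let d1 := (PySem.List.pyGet? dataWord 1).getD []
  let commonChar : List String :=
    if (d0.length : Int) ≤ (d1.length : Int) then
      d0.foldl (fun acc kv =>
        if (List.lookup kv.1 d1).isSome then
          acc ++ List.replicate (min ((List.lookup kv.1 d0).getD 0) ((List.lookup kv.1 d1).getD 0)).toNat kv.1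
        else acc) []
    else
      d1.foldl (fun acc kv =>
        if (List.lookup kv.1 d0).isSome then
          acc ++ List.replicate (min ((List.lookup kv.1 d0).getD 0) ((List.lookup kv.1 d1).getD 0)).toNat kv.1
        else acc) []
  PySem.List.sorted commonChar (fun x => x) false

-- ===== PORT B =====
-- B's while loop: a sort-merge join of the two key-sorted item lists,
-- as the obvious structural recursion on the two lists
def pvMerge : List (String × Int) → List (String × Int) → List String
  | [], _ => []
  | _ :: _, [] => []
  | (c0, n0) :: xs, (c1, n1) :: ys =>
    if c0 < c1 then pvMerge xs ((c1, n1) :: ys)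
    else if c1 < c0 then pvMerge ((c0, n0) :: xs) ys
    else List.replicate (min n0 n1).toNat c0 ++ pvMerge xs ys

def findCommonChar_alt (dataWord : List (List (String × Int))) : List String :=
  let items0 := PySem.List.sorted ((PySem.List.pyGet? dataWord 0).getD []) (fun kv => kv.1) false
  let items1 := PySem.List.sorted ((PySem.List.pyGet? dataWord 1).getD []) (fun kv => kv.1) false
  pvMerge items0 items1

-- ===== PRECONDITION & SPEC =====
-- Pre_ excludes (a) lists with fewer than two dicts, where A raises IndexError, and
-- (b) association lists with duplicate keys, which cannot arise from a Python dict argument.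
def Pre_findCommonChar (dataWord : List (List (String × Int))) : Prop :=
  2 ≤ dataWord.length ∧
  (((dataWord.getD 0 []).map Prod.fst).Nodup ∧ ((dataWord.getD 1 []).map Prod.fst).Nodup)

instance (dataWord : List (List (String × Int))) : Decidable (Pre_findCommonChar dataWord) := by
  unfold Pre_findCommonChar; infer_instance

def pvWitness_findCommonChar : (List (List (String × Int))) :=
  [[("a", 2), ("b", 1), ("c", -1)], [("b", 3), ("a", 1)]]

def Spec_findCommonChar (dataWord : List (List (String × Int))) (out : List String) : Prop := out = findCommonChar_alt dataWord
instance (dataWord : List (List (String × Int))) (out : List String) : Decidable (Spec_findCommonChar dataWord out) := by unfold Spec_findCommonChar; infer_instance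

-- ===== CLAIM (what is proved, stated in full; the proofs are below) =====
def Claim_equal_findCommonChar : Prop := ∀ (dataWord : List (List (String × Int))), Dom_findCommonChar dataWord → Pre_findCommonChar dataWord → Spec_findCommonChar dataWord (findCommonChar dataWord)

-- ===== LEMMAS AND PROOFS =====

-- A's loop shape: a conditional extend is a flatMap of conditional payloads
theorem pv_foldl_if_append {α β : Type} (l : List α) (p : α → Bool) (f : α → List β) (a : List β) :
    l.foldl (fun acc x => if p x then acc ++ f x else acc) a
      = a ++ l.flatMap (fun x => if p x then f x else []) := by
  induction l generalizing a with
  | nil => simp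
  | cons x xs ih =>
    by_cases h : p x <;> simp [List.foldl_cons, h, ih, List.flatMap_cons]

theorem pv_lookup_eq_none {β : Type} (d : List (String × β)) (s : String)
    (h : s ∉ d.map Prod.fst) : List.lookup s d = none := by
  induction d with
  | nil => rfl
  | cons kv rest ih =>
    simp only [List.map_cons, List.mem_cons, not_or] at h
    have hb : (s == kv.1) = false := beq_eq_false_iff_ne.mpr h.1
    simp [List.lookup, hb, ih h.2]

theorem pv_lookup_isSome_iff {β : Type} (d : List (String × β)) (s : String) :
    (List.lookup s d).isSome = true ↔ s ∈ d.map Prod.fst := by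
  induction d with
  | nil => simp [List.lookup]
  | cons kv rest ih =>
    by_cases h : s = kv.1
    · subst h; simp [List.lookup]
    · have hb : (s == kv.1) = false := beq_eq_false_iff_ne.mpr h
      simp only [List.lookup, hb, List.map_cons, List.mem_cons]
      rw [ih]
      simp [h]

-- count in A's pre-sort accumulation: the payload depends only on the key
theorem pv_count_keyRep (d : List (String × Int)) (g : String → Nat) (s : String)
    (hnd : (d.map Prod.fst).Nodup) :
    (d.flatMap (fun kv => List.replicate (g kv.1) kv.1)).count s
      = if s ∈ d.map Prod.fst then g s else 0 := by
  induction d with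
  | nil => simp
  | cons kv rest ih =>
    simp only [List.map_cons, List.nodup_cons] at hnd
    by_cases h : kv.1 = s
    · subst h
      simp [List.flatMap_cons, List.count_append, List.count_replicate, ih hnd.2, hnd.1]
    · have hb : (kv.1 == s) = false := beq_eq_false_iff_ne.mpr h
      have hm : (s ∈ kv.1 :: rest.map Prod.fst) ↔ s ∈ rest.map Prod.fst := by
        simp only [List.mem_cons, or_iff_right_iff_imp]
        intro hh; exact absurd hh.symm h
      simp only [List.flatMap_cons, List.count_append, List.count_replicate, ih hnd.2,
        List.map_cons, hb, hm]
      simp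

-- a looked-up value is the value of the unique entry with that key
theorem pv_lookup_eq_some_iff (l : List (String × Int)) (s : String) (v : Int)
    (hnd : (l.map Prod.fst).Nodup) : List.lookup s l = some v ↔ (s, v) ∈ l := by
  induction l with
  | nil => simp [List.lookup]
  | cons kv rest ih =>
    simp only [List.map_cons, List.nodup_cons] at hnd
    by_cases h : s = kv.1
    · subst h
      simp only [List.lookup, beq_self_eq_true, List.mem_cons]
      constructor
      · intro hv
        left
        cases kv
        simp_all
      · rintro (hv | hv)
        · cases kv; simp_all
        · exact absurd (List.mem_map.mpr ⟨(kv.1, v), hv, rfl⟩) hnd.1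
    · have hb : (s == kv.1) = false := beq_eq_false_iff_ne.mpr h
      simp only [List.lookup, hb, List.mem_cons]
      rw [ih hnd.2]
      constructor
      · exact Or.inr
      · rintro (hv | hv)
        · exact absurd (congrArg Prod.fst hv) h
        · exact hv

-- lookup in a duplicate-free association list is rearrangement-invariant
theorem pv_lookup_perm (l l' : List (String × Int)) (hp : l.Perm l')
    (hnd : (l.map Prod.fst).Nodup) (s : String) :
    List.lookup s l = List.lookup s l' := by
  have hnd' : (l'.map Prod.fst).Nodup := ((hp.map Prod.fst).nodup_iff).mp hnd
  cases h : List.lookup s l with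
  | some v =>
    exact ((pv_lookup_eq_some_iff l' s v hnd').mpr
      (hp.mem_iff.mp ((pv_lookup_eq_some_iff l s v hnd).mp h))).symm
  | none =>
    have hm : s ∉ l.map Prod.fst := by
      intro hmem
      rw [← pv_lookup_isSome_iff] at hmem
      simp [h] at hmem
    have hm' : s ∉ l'.map Prod.fst := fun hmem => hm ((hp.map Prod.fst).mem_iff.mpr hmem)
    exact (pv_lookup_eq_none _ _ hm').symm

-- ≤-sorted items with duplicate-free keys are strictly key-increasing
theorem pv_strict (l : List (String × Int))
    (h1 : l.Pairwise (fun a b => a.1 ≤ b.1)) (hnd : (l.map Prod.fst).Nodup) :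
    l.Pairwise (fun a b => a.1 < b.1) := by
  have h2 : l.Pairwise (fun a b => a.1 ≠ b.1) := List.pairwise_map.mp hnd
  exact (h1.and h2).imp (fun h => lt_of_le_of_ne h.1 h.2)

-- every element of the merge output is a key of one of the inputs
theorem pv_mem_pvMerge (xs ys : List (String × Int)) (z : String)
    (h : z ∈ pvMerge xs ys) : z ∈ xs.map Prod.fst ∨ z ∈ ys.map Prod.fst := by
  fun_induction pvMerge xs ys with
  | case1 ys => exact absurd h (by simp)
  | case2 x xs => exact absurd h (by simp)
  | case3 c0 n0 xs c1 n1 ys hlt ih =>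
    rcases ih h with h' | h'
    · exact Or.inl (List.mem_cons_of_mem _ h')
    · exact Or.inr h'
  | case4 c0 n0 xs c1 n1 ys hlt hgt ih =>
    rcases ih h with h' | h'
    · exact Or.inl h'
    · exact Or.inr (List.mem_cons_of_mem _ h')
  | case5 c0 n0 xs c1 n1 ys hlt hgt ih =>
    rcases List.mem_append.mp h with h' | h'
    · exact Or.inl (by simp [List.eq_of_mem_replicate h'])
    · rcases ih h' with h'' | h''
      · exact Or.inl (List.mem_cons_of_mem _ h'')
      · exact Or.inr (List.mem_cons_of_mem _ h'')

-- the merge output of strictly key-increasing inputs is sorted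
theorem pv_pvMerge_pairwise (xs ys : List (String × Int))
    (hx : xs.Pairwise (fun a b => a.1 < b.1)) (hy : ys.Pairwise (fun a b => a.1 < b.1)) :
    (pvMerge xs ys).Pairwise (· ≤ ·) := by
  fun_induction pvMerge xs ys with
  | case1 ys => exact List.Pairwise.nil
  | case2 x xs => exact List.Pairwise.nil
  | case3 c0 n0 xs c1 n1 ys hlt ih => exact ih hx.of_cons hy
  | case4 c0 n0 xs c1 n1 ys hlt hgt ih => exact ih hx hy.of_cons
  | case5 c0 n0 xs c1 n1 ys hlt hgt ih =>
    have hc : c0 = c1 := le_antisymm (not_lt.mp hgt) (not_lt.mp hlt)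
    subst hc
    obtain ⟨hxall, hxs⟩ := List.pairwise_cons.mp hx
    obtain ⟨hyall, hys⟩ := List.pairwise_cons.mp hy
    rw [List.pairwise_append]
    refine ⟨?_, ih hxs hys, ?_⟩
    · exact List.pairwise_replicate.mpr (Or.inr le_rfl)
    · intro a ha b hb
      rw [List.eq_of_mem_replicate ha]
      rcases pv_mem_pvMerge _ _ _ hb with h' | h'
      · rcases List.mem_map.mp h' with ⟨p, hp, hpe⟩
        exact hpe ▸ le_of_lt (hxall p hp)
      · rcases List.mem_map.mp h' with ⟨p, hp, hpe⟩
        exact hpe ▸ le_of_lt (hyall p hp)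

-- counts in the merge output: the per-key minimum
theorem pv_count_pvMerge (xs ys : List (String × Int)) (s : String)
    (hx : xs.Pairwise (fun a b => a.1 < b.1)) (hy : ys.Pairwise (fun a b => a.1 < b.1)) :
    (pvMerge xs ys).count s
      = min (((List.lookup s xs).getD 0).toNat) (((List.lookup s ys).getD 0).toNat) := by
  fun_induction pvMerge xs ys with
  | case1 ys => simp [List.lookup]
  | case2 x xs => simp [List.lookup]
  | case3 c0 n0 xs c1 n1 ys hlt ih =>
    obtain ⟨hyall, hys⟩ := List.pairwise_cons.mp hy
    rw [ih hx.of_cons hy]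
    by_cases h : s = c0
    · subst h
      have h1 : List.lookup s ((c1, n1) :: ys) = none := by
        apply pv_lookup_eq_none
        simp only [List.map_cons, List.mem_cons, not_or]
        refine ⟨ne_of_lt hlt, fun hmem => ?_⟩
        rcases List.mem_map.mp hmem with ⟨p, hp, hpe⟩
        exact absurd (hpe ▸ hyall p hp) (not_lt.mpr (le_of_lt hlt))
      rw [h1]
      simp
    · have hb : (s == c0) = false := beq_eq_false_iff_ne.mpr h
      simp only [List.lookup, hb]
  | case4 c0 n0 xs c1 n1 ys hlt hgt ih =>
    obtain ⟨hxall, hxs⟩ := List.pairwise_cons.mp hx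
    rw [ih hx hy.of_cons]
    by_cases h : s = c1
    · subst h
      have h1 : List.lookup s ((c0, n0) :: xs) = none := by
        apply pv_lookup_eq_none
        simp only [List.map_cons, List.mem_cons, not_or]
        refine ⟨ne_of_lt hgt, fun hmem => ?_⟩
        rcases List.mem_map.mp hmem with ⟨p, hp, hpe⟩
        exact absurd (hpe ▸ hxall p hp) (not_lt.mpr (le_of_lt hgt))
      rw [h1]
      simp
    · have hb : (s == c1) = false := beq_eq_false_iff_ne.mpr h
      simp only [List.lookup, hb]
  | case5 c0 n0 xs c1 n1 ys hlt hgt ih =>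
    have hc : c0 = c1 := le_antisymm (not_lt.mp hgt) (not_lt.mp hlt)
    subst hc
    obtain ⟨hxall, hxs⟩ := List.pairwise_cons.mp hx
    obtain ⟨hyall, hys⟩ := List.pairwise_cons.mp hy
    rw [List.count_append, ih hxs hys]
    by_cases h : s = c0
    · subst h
      have h1 : List.lookup s xs = none := by
        apply pv_lookup_eq_none
        intro hmem
        rcases List.mem_map.mp hmem with ⟨p, hp, hpe⟩
        exact absurd (hpe ▸ hxall p hp) (lt_irrefl s)
      have h2 : List.lookup s ys = none := by
        apply pv_lookup_eq_none
        intro hmem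
        rcases List.mem_map.mp hmem with ⟨p, hp, hpe⟩
        exact absurd (hpe ▸ hyall p hp) (lt_irrefl s)
      simp only [List.lookup, beq_self_eq_true, h1, h2, List.count_replicate,
        if_true, Option.getD_some, Option.getD_none]
      omega
    · have hb : (s == c0) = false := beq_eq_false_iff_ne.mpr h
      have hb' : (c0 == s) = false := beq_eq_false_iff_ne.mpr (Ne.symm h)
      simp [List.lookup, hb, hb', List.count_replicate]

-- the common count function both sides realise
theorem pv_branch_count (d e : List (String × Int)) (s : String)
    (hnd : (d.map Prod.fst).Nodup) :
    (d.flatMap (fun kv =>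
        if (List.lookup kv.1 e).isSome then
          List.replicate (min ((List.lookup kv.1 d).getD 0) ((List.lookup kv.1 e).getD 0)).toNat kv.1
        else [])).count s
      = min (((List.lookup s d).getD 0).toNat) (((List.lookup s e).getD 0).toNat) := by
  have hfun : (fun kv : String × Int =>
      if (List.lookup kv.1 e).isSome then
        List.replicate (min ((List.lookup kv.1 d).getD 0) ((List.lookup kv.1 e).getD 0)).toNat kv.1
      else []) = fun kv : String × Int =>
      List.replicate (if (List.lookup kv.1 e).isSome then
          (min ((List.lookup kv.1 d).getD 0) ((List.lookup kv.1 e).getD 0)).toNat else 0) kv.1 := by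
    funext kv; split <;> simp
  have hkey := pv_count_keyRep d (fun k => if (List.lookup k e).isSome then
      (min ((List.lookup k d).getD 0) ((List.lookup k e).getD 0)).toNat else 0) s hnd
  rw [hfun]
  refine hkey.trans ?_
  by_cases hd : s ∈ d.map Prod.fst
  · rw [if_pos hd]
    beta_reduce
    by_cases he : (List.lookup s e).isSome
    · rw [if_pos he]
      rcases Option.isSome_iff_exists.mp ((pv_lookup_isSome_iff d s).mpr hd) with ⟨v, hv⟩
      rcases Option.isSome_iff_exists.mp he with ⟨w, hw⟩
      simp only [hv, hw, Option.getD_some]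
      omega
    · rw [if_neg he]
      have hne : List.lookup s e = none := Option.not_isSome_iff_eq_none.mp he
      simp [hne]
  · rw [if_neg hd]
    have hnd' : List.lookup s d = none := pv_lookup_eq_none _ _ hd
    simp [hnd']

-- key-sorted items: sortedness, duplicate-free keys, unchanged lookups
theorem pv_sortedItems_strict (d : List (String × Int)) (hnd : (d.map Prod.fst).Nodup) :
    (PySem.List.sorted d (fun kv => kv.1) false).Pairwise (fun a b => a.1 < b.1) := by
  apply pv_strict
  · exact PySem.List.sorted_pairwise d (fun kv => kv.1)
  · exact (((PySem.List.sorted_perm d (fun kv => kv.1) false).map Prod.fst).nodup_iff).mpr hnd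

theorem pv_sortedItems_lookup (d : List (String × Int)) (hnd : (d.map Prod.fst).Nodup)
    (s : String) :
    List.lookup s (PySem.List.sorted d (fun kv => kv.1) false) = List.lookup s d :=
  pv_lookup_perm _ _ (PySem.List.sorted_perm d (fun kv => kv.1) false)
    ((((PySem.List.sorted_perm d (fun kv => kv.1) false).map Prod.fst).nodup_iff).mpr hnd) s

-- A's pre-sort list (first branch) is a permutation of B's output
theorem pv_perm_branch (d0 d1 : List (String × Int))
    (hnd0 : (d0.map Prod.fst).Nodup) (hnd1 : (d1.map Prod.fst).Nodup) :
    (pvMerge (PySem.List.sorted d0 (fun kv => kv.1) false)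
             (PySem.List.sorted d1 (fun kv => kv.1) false)).Perm
      (d0.flatMap (fun kv =>
        if (List.lookup kv.1 d1).isSome then
          List.replicate (min ((List.lookup kv.1 d0).getD 0) ((List.lookup kv.1 d1).getD 0)).toNat kv.1
        else [])) := by
  rw [List.perm_iff_count]
  intro s
  rw [pv_count_pvMerge _ _ _ (pv_sortedItems_strict d0 hnd0) (pv_sortedItems_strict d1 hnd1),
    pv_sortedItems_lookup d0 hnd0, pv_sortedItems_lookup d1 hnd1,
    pv_branch_count _ _ _ hnd0]

-- the second branch differs only by the symmetric roles of the two dicts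
theorem pv_perm_branch' (d0 d1 : List (String × Int))
    (hnd0 : (d0.map Prod.fst).Nodup) (hnd1 : (d1.map Prod.fst).Nodup) :
    (pvMerge (PySem.List.sorted d0 (fun kv => kv.1) false)
             (PySem.List.sorted d1 (fun kv => kv.1) false)).Perm
      (d1.flatMap (fun kv =>
        if (List.lookup kv.1 d0).isSome then
          List.replicate (min ((List.lookup kv.1 d0).getD 0) ((List.lookup kv.1 d1).getD 0)).toNat kv.1
        else [])) := by
  rw [List.perm_iff_count]
  intro s
  rw [pv_count_pvMerge _ _ _ (pv_sortedItems_strict d0 hnd0) (pv_sortedItems_strict d1 hnd1),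
    pv_sortedItems_lookup d0 hnd0, pv_sortedItems_lookup d1 hnd1]
  have h := pv_branch_count d1 d0 s hnd1
  have hfun : (fun kv : String × Int =>
      if (List.lookup kv.1 d0).isSome then
        List.replicate (min ((List.lookup kv.1 d1).getD 0) ((List.lookup kv.1 d0).getD 0)).toNat kv.1
      else []) = fun kv : String × Int =>
      if (List.lookup kv.1 d0).isSome then
        List.replicate (min ((List.lookup kv.1 d0).getD 0) ((List.lookup kv.1 d1).getD 0)).toNat kv.1
      else [] := by
    funext kv; rw [min_comm]
  rw [← hfun, h, min_comm]

-- ===== VERDICT (by name: the statement is the Claim_ definition above) =====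
theorem findCommonChar_spec : Claim_equal_findCommonChar := by
  intro dataWord _ hpre
  obtain ⟨hlen, hnd0, hnd1⟩ := hpre
  unfold Spec_findCommonChar findCommonChar findCommonChar_alt
  have h0 : PySem.List.pyGet? dataWord 0 = some (dataWord.getD 0 []) := by
    rcases dataWord with _ | ⟨a, rest⟩
    · simp at hlen
    · simp [PySem.List.pyGet?, PySem.List.pyIdx?]
  have h1 : PySem.List.pyGet? dataWord 1 = some (dataWord.getD 1 []) := by
    rcases dataWord with _ | ⟨a, rest⟩
    · simp at hlen
    · rcases rest with _ | ⟨b, rest'⟩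
      · simp at hlen
      · simp [PySem.List.pyGet?, PySem.List.pyIdx?]
  rw [h0, h1]
  simp only [Option.getD_some]
  rw [pv_foldl_if_append, pv_foldl_if_append, List.nil_append, List.nil_append]
  split
  · exact PySem.List.sorted_id_eq_of_perm_of_pairwise _ _
      (pv_perm_branch _ _ hnd0 hnd1)
      (pv_pvMerge_pairwise _ _ (pv_sortedItems_strict _ hnd0) (pv_sortedItems_strict _ hnd1))
  · exact PySem.List.sorted_id_eq_of_perm_of_pairwise _ _
      (pv_perm_branch' _ _ hnd0 hnd1)
      (pv_pvMerge_pairwise _ _ (pv_sortedItems_strict _ hnd0) (pv_sortedItems_strict _ hnd1))
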